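-- pv_equiv track=rewrite | github.com/vaskosmihaylov/freqai-foundry-strategies | scripts/trade_report.py | normalize_jsonc_layout
-- ===== SOURCE A (Python) =====
-- def normalize_jsonc_layout(text: str) -> str:
--     """Repair common JSONC layout issues into valid JSON."""
--
--     lines = [line.rstrip() for line in text.splitlines()]
--     normalized_lines: list[str] = []
--     previous: str | None = None
--
--     def is_value_end(line: str) -> bool:
--         stripped = line.rstrip()
--         return stripped.endswith(("}", "]", '"')) or stripped.endswith(
--             ("true", "false", "null")
--         ) or stripped[-1:].isdigit()
--
--     def starts_new_value(line: str) -> bool: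
--         stripped = line.lstrip()
--         return (
--             stripped.startswith('"')
--             or stripped.startswith("{")
--             or stripped.startswith("[")
--             or stripped.startswith(("true", "false", "null"))
--             or stripped[:1].isdigit()
--             or stripped.startswith("-")
--         )
--
--     for current in lines:
--         if not current.strip():
--             continue
--         if previous is None:
--             previous = current
--             continue
--
--         if previous.rstrip().endswith(",") and current.lstrip().startswith(("}", "]")):
--             previous = previous.rstrip().rstrip(",")
--
--         if is_value_end(previous) and starts_new_value(current):
--             stripped = current.lstrip()
--             key_line = stripped.startswith('"') and ":" in stripped
--             open_value_line = stripped.startswith(("{", "["))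
--             scalar_value_line = not key_line and (
--                 stripped.startswith('"')
--                 or stripped.startswith(("true", "false", "null"))
--                 or stripped[:1].isdigit()
--                 or stripped.startswith("-")
--             )
--             if key_line or open_value_line or scalar_value_line:
--                 previous = previous.rstrip()
--                 if not previous.endswith(","):
--                     previous = previous + ","
--
--         normalized_lines.append(previous)
--         previous = current
--
--     if previous is not None:
--         if previous.rstrip().endswith(","):
--             previous = previous.rstrip().rstrip(",")
--         normalized_lines.append(previous)
--
--     return "\n".join(normalized_lines)
-- ===== SOURCE B (Python) =====
-- def normalize_jsonc_layout(text: str) -> str: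
--     """Repair common JSONC layout issues into valid JSON (classify-then-combine formulation)."""
--
--     # Stage 1: one classification pass — each kept line becomes a record of its body
--     # plus the four boundary-relevant flags.
--     recs = []
--     for raw in text.splitlines():
--         body = raw.rstrip()
--         if not body.strip():
--             continue
--         s = body.lstrip()
--         recs.append((
--             body,
--             body.endswith(","),                                        # trailing comma
--             s.startswith(("}", "]")),                                  # closes a container
--             s.startswith(('"', "{", "[", "true", "false", "null", "-"))
--             or s[:1].isdigit(),                                        # starts a new value
--             body.endswith(("}", "]", '"', "true", "false", "null"))
--             or body[-1:].isdigit(),                                    # ends a value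
--         ))
--
--     # Stage 2: recursion over the records, combining each with its successor's flags.
--     # The two edits are mutually exclusive: a closing line never starts a new value,
--     # and a line ending in ',' never ends a value.
--     def render(i: int) -> str:
--         body, comma, _, _, vend = recs[i]
--         if i + 1 == len(recs):
--             return body.rstrip(",") if comma else body
--         _, _, closes, news, _ = recs[i + 1]
--         if comma and closes:
--             body = body.rstrip(",")
--         elif vend and news:
--             body = body + ","
--         return body + "\n" + render(i + 1)
--
--     return render(0) if recs else ""
-- ===== Notes on version B (the rewrite author's own statement) =====
-- stated objective: alternative
-- what changed: Replaces A's streaming loop carrying a mutable preceding-line accumulator and re-deriving its predicates at every step by a two-stage design: one classification pass turns each kept line into a record of four precomputed boundary flags (trailing comma, closes, starts-new-value, ends-value), then a recursion over the records emits the output string directly, exploiting the proved mutual exclusivity of the comma-strip and comma-add edits (a closing line never starts a value; a line ending in a comma never ends a value) so each boundary is a single if/elif on stored flags.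
import Mathlib
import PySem

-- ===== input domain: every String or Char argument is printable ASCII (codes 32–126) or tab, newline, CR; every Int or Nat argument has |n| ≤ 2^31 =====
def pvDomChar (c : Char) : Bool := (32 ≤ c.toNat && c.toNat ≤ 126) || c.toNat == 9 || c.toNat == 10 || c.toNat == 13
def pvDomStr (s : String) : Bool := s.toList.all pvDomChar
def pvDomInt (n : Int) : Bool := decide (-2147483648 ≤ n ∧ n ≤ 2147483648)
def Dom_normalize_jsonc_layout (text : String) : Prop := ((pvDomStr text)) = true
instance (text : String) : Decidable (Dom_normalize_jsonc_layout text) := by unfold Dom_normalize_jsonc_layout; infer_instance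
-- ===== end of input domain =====

-- B replaces A's streaming accumulator (mutable 'previous', predicates re-derived per step) by a
-- classification pass into per-line flag records followed by a recursion combining adjacent records
-- (objective: alternative decomposition; same asymptotic cost).

-- ===== PORT A =====
-- exact port of Python's str.rstrip(",") — strip ',' from the right end only
-- (PySem.Chars.stripChars strips both ends, so this primitive is ported by hand)
def pvRstripComma (s : List Char) : List Char := (s.reverse.dropWhile (· == ',')).reverse

def pvA_isValueEnd (line : List Char) : Bool :=
  let stripped := PySem.Chars.rstrip line
  PySem.Chars.endswith stripped ['}'] || PySem.Chars.endswith stripped [']'] ||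
  PySem.Chars.endswith stripped ['"'] ||
  PySem.Chars.endswith stripped ['t','r','u','e'] || PySem.Chars.endswith stripped ['f','a','l','s','e'] ||
  PySem.Chars.endswith stripped ['n','u','l','l'] ||
  PySem.Chars.strIsdigit (PySem.Chars.slice stripped (some (-1)) none)

def pvA_startsNewValue (line : List Char) : Bool :=
  let stripped := PySem.Chars.lstrip line
  PySem.Chars.startswith stripped ['"'] || PySem.Chars.startswith stripped ['{'] ||
  PySem.Chars.startswith stripped ['['] ||
  PySem.Chars.startswith stripped ['t','r','u','e'] || PySem.Chars.startswith stripped ['f','a','l','s','e'] ||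
  PySem.Chars.startswith stripped ['n','u','l','l'] ||
  PySem.Chars.strIsdigit (PySem.Chars.slice stripped none (some 1)) ||
  PySem.Chars.startswith stripped ['-']

def pvA_step (st : List (List Char) × Option (List Char)) (current : List Char) :
    List (List Char) × Option (List Char) :=
  if (PySem.Chars.strip current).isEmpty then st
  else match st.2 with
  | none => (st.1, some current)
  | some previous =>
    let previous :=
      if PySem.Chars.endswith (PySem.Chars.rstrip previous) [','] &&
         (PySem.Chars.startswith (PySem.Chars.lstrip current) ['}'] ||
          PySem.Chars.startswith (PySem.Chars.lstrip current) [']'])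
      then pvRstripComma (PySem.Chars.rstrip previous) else previous
    let previous :=
      if pvA_isValueEnd previous && pvA_startsNewValue current then
        let stripped := PySem.Chars.lstrip current
        let key_line := PySem.Chars.startswith stripped ['"'] && PySem.Chars.isIn [':'] stripped
        let open_value_line := PySem.Chars.startswith stripped ['{'] || PySem.Chars.startswith stripped ['[']
        let scalar_value_line := !key_line &&
          (PySem.Chars.startswith stripped ['"'] ||
           PySem.Chars.startswith stripped ['t','r','u','e'] || PySem.Chars.startswith stripped ['f','a','l','s','e'] ||
           PySem.Chars.startswith stripped ['n','u','l','l'] ||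
           PySem.Chars.strIsdigit (PySem.Chars.slice stripped none (some 1)) ||
           PySem.Chars.startswith stripped ['-'])
        if key_line || open_value_line || scalar_value_line then
          let p := PySem.Chars.rstrip previous
          if !(PySem.Chars.endswith p [',']) then p ++ [','] else p
        else previous
      else previous
    (st.1 ++ [previous], some current)

def normalize_jsonc_layout (text : String) : String :=
  let lines := (PySem.Chars.splitlines text.toList).map PySem.Chars.rstrip
  let res := lines.foldl pvA_step ([], none)
  let normalized :=
    match res.2 with
    | none => res.1
    | some previous =>
      let previous :=
        if PySem.Chars.endswith (PySem.Chars.rstrip previous) [',']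
        then pvRstripComma (PySem.Chars.rstrip previous) else previous
      res.1 ++ [previous]
  String.ofList (PySem.Chars.join ['\n'] normalized)

-- ===== PORT B =====
-- stage 1: each kept line becomes (body, trailing-comma, closes, starts-new-value, ends-value)
def pvRec (body : List Char) : List Char × Bool × Bool × Bool × Bool :=
  let s := PySem.Chars.lstrip body
  (body,
   PySem.Chars.endswith body [','],
   PySem.Chars.startswith s ['}'] || PySem.Chars.startswith s [']'],
   ([['"'], ['{'], ['['], ['t','r','u','e'], ['f','a','l','s','e'], ['n','u','l','l'], ['-']].any
       (fun p => PySem.Chars.startswith s p)) ||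
     PySem.Chars.strIsdigit (PySem.Chars.slice s none (some 1)),
   ([['}'], [']'], ['"'], ['t','r','u','e'], ['f','a','l','s','e'], ['n','u','l','l']].any
       (fun p => PySem.Chars.endswith body p)) ||
     PySem.Chars.strIsdigit (PySem.Chars.slice body (some (-1)) none))

-- stage 2: recursion over the records, combining each body with its successor's flags
def pvB_render : (List Char × Bool × Bool × Bool × Bool) → List (List Char × Bool × Bool × Bool × Bool) → List Char
  | (body, comma, _, _, _), [] => if comma then pvRstripComma body else body
  | (body, comma, _, _, vend), r :: rest =>
      let body :=
        if comma && r.2.2.1 then pvRstripComma body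
        else if vend && r.2.2.2.1 then body ++ [','] else body
      body ++ '\n' :: pvB_render r rest

def normalize_jsonc_layout_alt (text : String) : String :=
  let recs := (PySem.Chars.splitlines text.toList).filterMap (fun raw =>
      let body := PySem.Chars.rstrip raw
      if (PySem.Chars.strip body).isEmpty then none else some (pvRec body))
  match recs with
  | [] => String.ofList []
  | r :: rest => String.ofList (pvB_render r rest)

-- ===== PRECONDITION & SPEC =====
def Spec_normalize_jsonc_layout (text : String) (out : String) : Prop := out = normalize_jsonc_layout_alt text
instance (text : String) (out : String) : Decidable (Spec_normalize_jsonc_layout text out) := by unfold Spec_normalize_jsonc_layout; infer_instance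

-- ===== CLAIM (what is proved, stated in full; the proofs are below) =====
def Claim_equal_normalize_jsonc_layout : Prop := ∀ (text : String), Dom_normalize_jsonc_layout text → Spec_normalize_jsonc_layout text (normalize_jsonc_layout text)

-- ===== LEMMAS AND PROOFS =====
-- proof-only: A's per-boundary transformation, with the inner key/open/scalar test collapsed
def pvAfix (p c : List Char) : List Char :=
  let p :=
    if PySem.Chars.endswith (PySem.Chars.rstrip p) [','] &&
       (PySem.Chars.startswith (PySem.Chars.lstrip c) ['}'] ||
        PySem.Chars.startswith (PySem.Chars.lstrip c) [']'])
    then pvRstripComma (PySem.Chars.rstrip p) else p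
  if pvA_isValueEnd p && pvA_startsNewValue c then
    let q := PySem.Chars.rstrip p
    if !(PySem.Chars.endswith q [',']) then q ++ [','] else q
  else p

lemma pv_rstrip_idem (s : List Char) :
    PySem.Chars.rstrip (PySem.Chars.rstrip s) = PySem.Chars.rstrip s := by
  simp [PySem.Chars.rstrip, List.dropWhile_idempotent]

lemma pv_getLast?_cons {α : Type} (a : α) (l : List α) :
    (a :: l).getLast? = some (l.getLastD a) := by
  induction l generalizing a with
  | nil => rfl
  | cons b t ih => rw [List.getLast?_cons_cons, ih b, List.getLastD_cons]

lemma pv_bool_taut (q o1 o2 t f n d m colon : Bool) :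
    (q && colon || (o1 || o2) || (!(q && colon) && (q || t || f || n || d || m))) =
    (q || o1 || o2 || t || f || n || d || m) := by
  revert q o1 o2 t f n d m colon; decide

lemma pv_inner_eq (c : List Char) :
    ((PySem.Chars.startswith (PySem.Chars.lstrip c) ['"'] && PySem.Chars.isIn [':'] (PySem.Chars.lstrip c)) ||
      (PySem.Chars.startswith (PySem.Chars.lstrip c) ['{'] || PySem.Chars.startswith (PySem.Chars.lstrip c) ['[']) ||
      (!(PySem.Chars.startswith (PySem.Chars.lstrip c) ['"'] && PySem.Chars.isIn [':'] (PySem.Chars.lstrip c)) &&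
        (PySem.Chars.startswith (PySem.Chars.lstrip c) ['"'] ||
         PySem.Chars.startswith (PySem.Chars.lstrip c) ['t','r','u','e'] ||
         PySem.Chars.startswith (PySem.Chars.lstrip c) ['f','a','l','s','e'] ||
         PySem.Chars.startswith (PySem.Chars.lstrip c) ['n','u','l','l'] ||
         PySem.Chars.strIsdigit (PySem.Chars.slice (PySem.Chars.lstrip c) none (some 1)) ||
         PySem.Chars.startswith (PySem.Chars.lstrip c) ['-']))) = pvA_startsNewValue c := by
  simp only [pvA_startsNewValue]
  exact pv_bool_taut _ _ _ _ _ _ _ _ _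

lemma pv_step_skip (st : List (List Char) × Option (List Char)) (c : List Char)
    (hc : (PySem.Chars.strip c).isEmpty = true) : pvA_step st c = st := by
  simp [pvA_step, hc]

lemma pv_step_core (acc : List (List Char)) (p c : List Char)
    (hc : (PySem.Chars.strip c).isEmpty = false) :
    pvA_step (acc, some p) c = (acc ++ [pvAfix p c], some c) := by
  simp only [pvA_step, pvAfix, hc, Bool.false_eq_true, if_false]
  rw [pv_inner_eq]
  by_cases hnv : pvA_startsNewValue c = true <;> simp [hnv]

lemma pv_loop_shape (l : List (List Char)) (p : List Char) (acc : List (List Char))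
    (hl : ∀ s ∈ l, (PySem.Chars.strip s).isEmpty = false) :
    l.foldl pvA_step (acc, some p) =
      (acc ++ ((p :: l).zip l).map (fun pc => pvAfix pc.1 pc.2), some (l.getLastD p)) := by
  induction l generalizing p acc with
  | nil => simp
  | cons c rest ih =>
    have hc := hl c (by simp)
    have hrest : ∀ s ∈ rest, (PySem.Chars.strip s).isEmpty = false := by
      intro s hs; exact hl s (List.mem_cons_of_mem c hs)
    rw [List.foldl_cons, pv_step_core acc p c hc, ih c _ hrest]
    simp [pv_getLast?_cons, List.getLastD_eq_getLast?]

-- flag bridges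
lemma pv_vend_eq (p : List Char) (hp : PySem.Chars.rstrip p = p) :
    (pvRec p).2.2.2.2 = pvA_isValueEnd p := by
  simp [pvRec, pvA_isValueEnd, hp, Bool.or_assoc]

lemma pv_news_eq (c : List Char) :
    (pvRec c).2.2.2.1 = pvA_startsNewValue c := by
  simp only [pvRec, pvA_startsNewValue, List.any_cons, List.any_nil]
  simp [Bool.or_assoc, Bool.or_comm, Bool.or_left_comm]

lemma pv_close_head_not_new (x : Char) (t c : List Char)
    (ht : x :: t = PySem.Chars.lstrip c) (hx : x = '}' ∨ x = ']') :
    pvA_startsNewValue c = false := by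
  have hsl : PySem.List.slice (x :: t) none (some 1) = [x] := by
    rw [show (1 : Int) = ((1 : Nat) : Int) by norm_num, PySem.List.slice_to_natCast]
    simp
  have hdig : PySem.Chars.strIsdigit [x] = false := by
    rcases hx with rfl | rfl <;> decide
  simp only [pvA_startsNewValue]
  rw [← ht]
  rcases hx with rfl | rfl <;>
    simp [PySem.Chars.startswith, List.isPrefixOf, PySem.Chars.slice, hsl, hdig]

-- a line whose stripped form opens with '}' or ']' never starts a new value
lemma pv_closes_not_new (c : List Char)
    (h : (PySem.Chars.startswith (PySem.Chars.lstrip c) ['}'] ||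
          PySem.Chars.startswith (PySem.Chars.lstrip c) [']']) = true) :
    pvA_startsNewValue c = false := by
  rcases Bool.or_eq_true_iff.mp h with h1 | h1 <;>
    obtain ⟨t, ht⟩ := (PySem.Chars.startswith_iff _ _).mp h1
  · exact pv_close_head_not_new '}' t c ht (Or.inl rfl)
  · exact pv_close_head_not_new ']' t c ht (Or.inr rfl)

-- a (right-stripped) line ending in ',' never ends a value
lemma pv_comma_not_valueEnd (p : List Char) (hp : PySem.Chars.rstrip p = p)
    (h : PySem.Chars.endswith p [','] = true) :
    pvA_isValueEnd p = false := by
  obtain ⟨t, ht⟩ := (PySem.Chars.endswith_iff _ _).mp h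
  have hsl : PySem.List.slice (t ++ [',']) (some (-1)) none = [','] := by
    rw [PySem.List.slice_from_neg_one]
    simp
  have hdig : PySem.Chars.strIsdigit [','] = false := by decide
  simp only [pvA_isValueEnd, hp]
  rw [← ht]
  simp [PySem.Chars.endswith, List.isSuffixOf, List.isPrefixOf, PySem.Chars.slice, hsl, hdig]

-- A's boundary fix equals B's flag combination (previous line already right-stripped)
lemma pv_fix_eq_combine (p c : List Char) (hp : PySem.Chars.rstrip p = p) :
    pvAfix p c =
      (if (pvRec p).2.1 && (pvRec c).2.2.1 then pvRstripComma p
       else if (pvRec p).2.2.2.2 && (pvRec c).2.2.2.1 then p ++ [','] else p) := by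
  rw [pv_vend_eq p hp, pv_news_eq c]
  have hcomma : (pvRec p).2.1 = PySem.Chars.endswith p [','] := rfl
  have hcloses : (pvRec c).2.2.1 =
      (PySem.Chars.startswith (PySem.Chars.lstrip c) ['}'] ||
       PySem.Chars.startswith (PySem.Chars.lstrip c) [']']) := rfl
  rw [hcomma, hcloses]
  simp only [pvAfix, hp]
  by_cases h1 : PySem.Chars.endswith p [','] = true
  · by_cases h2 : (PySem.Chars.startswith (PySem.Chars.lstrip c) ['}'] ||
        PySem.Chars.startswith (PySem.Chars.lstrip c) [']']) = true
    · simp [h1, h2, pv_closes_not_new c h2]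
    · simp only [h1, h2]
      simp [pv_comma_not_valueEnd p hp h1]
  · simp only [Bool.not_eq_true] at h1
    simp [h1, hp]

lemma pv_join_cons (sep a : List Char) (t : List (List Char)) (ht : t ≠ []) :
    PySem.Chars.join sep (a :: t) = a ++ sep ++ PySem.Chars.join sep t := by
  cases t with
  | nil => exact absurd rfl ht
  | cons b m => exact PySem.Chars.join_cons_cons sep a b m

lemma pv_render_eq (l : List (List Char)) (p : List Char)
    (h : ∀ s ∈ p :: l, PySem.Chars.rstrip s = s) :
    pvB_render (pvRec p) (l.map pvRec) =
      PySem.Chars.join ['\n']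
        (((p :: l).zip l).map (fun pc => pvAfix pc.1 pc.2) ++
         [if PySem.Chars.endswith (PySem.Chars.rstrip (l.getLastD p)) [',']
          then pvRstripComma (PySem.Chars.rstrip (l.getLastD p)) else l.getLastD p]) := by
  induction l generalizing p with
  | nil =>
    have hp := h p (by simp)
    simp [pvB_render, pvRec, PySem.Chars.join_singleton, hp]
  | cons c l ih =>
    have hp := h p (by simp)
    have hrest : ∀ s ∈ c :: l, PySem.Chars.rstrip s = s := by
      intro s hs; exact h s (by simpa using Or.inr hs)
    have hrender : pvB_render (pvRec p) (pvRec c :: l.map pvRec) =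
        (if (pvRec p).2.1 && (pvRec c).2.2.1 then pvRstripComma p
         else if (pvRec p).2.2.2.2 && (pvRec c).2.2.2.1 then p ++ [','] else p) ++
          '\n' :: pvB_render (pvRec c) (l.map pvRec) := rfl
    rw [List.map_cons, hrender, ← pv_fix_eq_combine p c hp, ih c hrest]
    rw [List.zip_cons_cons, List.map_cons, List.getLastD_cons]
    rw [List.cons_append, pv_join_cons ['\n'] _ _ (by simp)]
    simp

lemma pv_filterMap_eq (L : List (List Char)) :
    L.filterMap (fun raw =>
      let body := PySem.Chars.rstrip raw
      if (PySem.Chars.strip body).isEmpty then none else some (pvRec body)) =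
    ((L.map PySem.Chars.rstrip).filter (fun s => !(PySem.Chars.strip s).isEmpty)).map pvRec := by
  induction L with
  | nil => rfl
  | cons a t ih =>
    by_cases h : PySem.Chars.strip (PySem.Chars.rstrip a) = [] <;>
      simpa [List.filterMap_cons, List.filter_cons, List.isEmpty_iff, h] using ih

-- ===== VERDICT (by name: the statement is the Claim_ definition above) =====
theorem normalize_jsonc_layout_spec : Claim_equal_normalize_jsonc_layout := by
  intro text _
  unfold Spec_normalize_jsonc_layout
  simp only [normalize_jsonc_layout, normalize_jsonc_layout_alt]
  rw [pv_filterMap_eq]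
  set L := (PySem.Chars.splitlines text.toList).map PySem.Chars.rstrip with hL
  set clean := L.filter (fun s => !(PySem.Chars.strip s).isEmpty) with hclean
  have hmem : ∀ s ∈ clean, PySem.Chars.rstrip s = s ∧ (PySem.Chars.strip s).isEmpty = false := by
    intro s hs
    rw [hclean, List.mem_filter] at hs
    obtain ⟨hm, hpred⟩ := hs
    refine ⟨?_, by simpa using hpred⟩
    rw [hL] at hm
    obtain ⟨y, _, rfl⟩ := List.mem_map.mp hm
    exact pv_rstrip_idem y
  have hstep : (fun (st : List (List Char) × Option (List Char)) c =>
      if (!(PySem.Chars.strip c).isEmpty) = true then pvA_step st c else st) = pvA_step := by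
    funext st c
    by_cases h : (PySem.Chars.strip c).isEmpty
    · simp [h, pv_step_skip st c h]
    · simp [h]
  have hfold : clean.foldl pvA_step (([] : List (List Char)), (none : Option (List Char))) =
      L.foldl pvA_step ([], none) := by
    rw [hclean, List.foldl_filter, hstep]
  rw [← hfold]
  cases hc : clean with
  | nil => simp
  | cons p l =>
    have hmem' : ∀ s ∈ p :: l, PySem.Chars.rstrip s = s ∧ (PySem.Chars.strip s).isEmpty = false := by
      intro s hs; exact hmem s (hc ▸ hs)
    have hfirst : pvA_step ([], none) p = ([], some p) := by
      simp [pvA_step, (hmem' p (by simp)).2]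
    rw [List.foldl_cons, hfirst,
        pv_loop_shape l p [] (fun s hs => (hmem' s (List.mem_cons_of_mem p hs)).2)]
    simp only [List.map_cons, List.nil_append]
    rw [pv_render_eq l p (fun s hs => (hmem' s hs).1)]
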